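-- pv_equiv track=rewrite | github.com/2226171237/Algorithmpractice | 字节/下一个排列.py | getOne
-- ===== SOURCE A (Python) =====
-- def getOne(arr):
--     i=len(arr)-1
--     j=len(arr)-2
--     while j>=0:
--         if arr[j]<arr[i]:
--             return j
--         i-=1
--         j-=1
--     else:
--         return -1
-- ===== SOURCE B (Python) =====
-- def getOne(arr):
--     result = -1
--     for j in range(len(arr) - 1):
--         if arr[j] < arr[j + 1]:
--             result = j
--     return result
-- ===== Notes on version B (the rewrite author's own statement) =====
-- stated objective: alternative
-- what changed: Replaced A's back-to-front early-returning while-loop with a single forward full scan over range(len-1) that keeps the last matching adjacent-pair index in an accumulator (simple for-loop, no manual index bookkeeping).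
import Mathlib
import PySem

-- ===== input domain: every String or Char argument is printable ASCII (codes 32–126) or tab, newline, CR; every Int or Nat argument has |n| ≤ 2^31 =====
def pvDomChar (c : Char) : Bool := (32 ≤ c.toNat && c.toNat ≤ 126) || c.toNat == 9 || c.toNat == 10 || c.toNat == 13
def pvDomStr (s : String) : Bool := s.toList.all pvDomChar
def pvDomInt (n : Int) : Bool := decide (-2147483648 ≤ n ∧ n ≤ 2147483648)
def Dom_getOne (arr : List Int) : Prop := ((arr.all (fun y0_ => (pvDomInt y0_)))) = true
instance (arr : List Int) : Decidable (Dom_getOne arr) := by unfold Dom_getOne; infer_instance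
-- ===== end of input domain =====

-- B replaces A's back-to-front early-returning scan with a forward full scan keeping the last matching index (alternative decomposition, same cost).


-- ===== PORT A =====
-- A's while-loop, j counting down from len-2; fuel = j+1 (0 means j < 0, return -1).
def getOneAux (arr : List Int) : Nat → Int
  | 0 => -1
  | Nat.succ j => if arr.getD j 0 < arr.getD (j + 1) 0 then (j : Int) else getOneAux arr j

def getOne (arr : List Int) : Int := getOneAux arr (arr.length - 1)

-- ===== PORT B =====
-- forward scan over all adjacent pairs, accumulator keeps the last matching index
def getOne_alt (arr : List Int) : Int :=
  (List.range (arr.length - 1)).foldl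
    (fun result j => if arr.getD j 0 < arr.getD (j + 1) 0 then (j : Int) else result) (-1)

-- ===== PRECONDITION & SPEC =====
def Spec_getOne (arr : List Int) (out : Int) : Prop := out = getOne_alt arr
instance (arr : List Int) (out : Int) : Decidable (Spec_getOne arr out) := by unfold Spec_getOne; infer_instance

-- ===== CLAIM (what is proved, stated in full; the proofs are below) =====
def Claim_equal_getOne : Prop := ∀ (arr : List Int), Dom_getOne arr → Spec_getOne arr (getOne arr)

-- ===== LEMMAS AND PROOFS =====
theorem foldl_range_eq_aux (arr : List Int) (k : Nat) :
    (List.range k).foldl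
      (fun result j => if arr.getD j 0 < arr.getD (j + 1) 0 then (j : Int) else result) (-1)
      = getOneAux arr k := by
  induction k with
  | zero => simp [getOneAux]
  | succ k ih =>
    rw [List.range_succ, List.foldl_append, ih]
    simp only [List.foldl_cons, List.foldl_nil, getOneAux]


-- ===== VERDICT (by name: the statement is the Claim_ definition above) =====
theorem getOne_spec : Claim_equal_getOne := by
  intro arr _
  unfold Spec_getOne getOne getOne_alt
  exact (foldl_range_eq_aux arr _).symm
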